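-- pv_equiv track=rewrite | github.com/potassco/clorm | clorm/orm.py | _predicatedefn_default_predicate_name
-- ===== SOURCE A (Python) =====
-- def _predicatedefn_default_predicate_name(class_name):
--
--     # If first letter is lower-case then do nothing
--     if class_name[0].islower(): return class_name
--
--     # Otherwise, replace any sequence of upper-case only characters that occur
--     # at the beginning of the string or immediately after an underscore with
--     # lower-case equivalents. The sequence of upper-case characters can include
--     # non-alphabetic characters (eg., numbers) and this will still be treated as
--     # a single sequence of upper-case characters.  This covers basic naming
--     # conventions: camel-case, snake-case, and acronyms.
--
--     output=""
--     incap=True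
--     for c in class_name:
--         if c == '_': output += c ; incap = True ; continue
--         if not c.isalpha(): output += c ; continue
--         if not incap: output += c ; continue
--         if c.isupper(): output += c.lower() ; continue
--         else: output += c ; incap = False ; continue
--
--     return output
-- ===== SOURCE B (Python) =====
-- def _predicatedefn_default_predicate_name(class_name):
--     # If first letter is lower-case then do nothing
--     if class_name[0].islower(): return class_name
--
--     # Split on underscores and fix each segment independently: find the end of the
--     # leading upper-case run, lowercase it, keep the rest verbatim.
--     def fix(seg):
--         i = 0
--         while i < len(seg) and not (seg[i].isalpha() and not seg[i].isupper()):
--             i += 1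
--         return ''.join(c.lower() if c.isupper() else c for c in seg[:i]) + seg[i:]
--
--     return '_'.join(fix(seg) for seg in class_name.split('_'))
-- ===== Notes on version B (the rewrite author's own statement) =====
-- stated objective: alternative
-- what changed: Replaced A's single-pass two-variable state machine with a split-on-underscore decomposition: each segment is fixed independently by locating the first alphabetic non-uppercase character and lowercasing the uppercase letters before it, then the segments are rejoined with underscores.
import Mathlib
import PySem

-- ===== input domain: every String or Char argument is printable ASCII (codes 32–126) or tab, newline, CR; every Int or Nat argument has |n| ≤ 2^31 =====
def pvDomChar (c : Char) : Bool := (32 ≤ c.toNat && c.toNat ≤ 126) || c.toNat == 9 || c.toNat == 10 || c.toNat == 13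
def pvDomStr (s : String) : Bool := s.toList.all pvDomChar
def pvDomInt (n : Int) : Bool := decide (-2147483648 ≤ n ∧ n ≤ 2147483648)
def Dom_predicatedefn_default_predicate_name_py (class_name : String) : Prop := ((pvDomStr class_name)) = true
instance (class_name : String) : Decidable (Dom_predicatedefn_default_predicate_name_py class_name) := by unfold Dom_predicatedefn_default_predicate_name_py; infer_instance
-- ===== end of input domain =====

-- B replaces A's incap state machine with split-on-underscore / fix-each-segment / rejoin (alternative decomposition, same cost).
-- ===== PORT A =====
-- one loop step of A: state = (output so far, incap flag)
def pvStepA (st : List Char × Bool) (c : Char) : List Char × Bool :=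
  if c = '_' then (st.1 ++ [c], true)
  else if ¬ PySem.Chars.isalpha c then (st.1 ++ [c], st.2)
  else if ¬ st.2 then (st.1 ++ [c], st.2)
  else if PySem.Chars.isupper c then (st.1 ++ [PySem.Chars.lowerChar c], st.2)
  else (st.1 ++ [c], false)

def predicatedefn_default_predicate_name_py (class_name : String) : String :=
  match PySem.List.pyGet? class_name.toList 0 with
  | none => ""  -- Python raises IndexError on ""; excluded by Pre_
  | some c0 =>
    if PySem.Chars.islower c0 then class_name
    else String.ofList ((class_name.toList.foldl pvStepA ([], true)).1)

-- ===== PORT B =====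
-- first index i of seg with seg[i].isalpha() and not seg[i].isupper() (len(seg) if none) — B's while loop
def pvIdxB : List Char → Nat
  | [] => 0
  | c :: rest =>
    if PySem.Chars.isalpha c && !PySem.Chars.isupper c then 0 else pvIdxB rest + 1

-- B's fix(seg)
def pvFixSeg (seg : List Char) : List Char :=
  let i := pvIdxB seg
  (seg.take i).map (fun c => if PySem.Chars.isupper c then PySem.Chars.lowerChar c else c)
    ++ seg.drop i

def predicatedefn_default_predicate_name_py_alt (class_name : String) : String :=
  match PySem.List.pyGet? class_name.toList 0 with
  | none => ""  -- Python raises IndexError on ""; excluded by Pre_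
  | some c0 =>
    if PySem.Chars.islower c0 then class_name
    else
      String.ofList (PySem.Chars.join ['_'] ((class_name.toList.splitOn '_').map pvFixSeg))

-- ===== PRECONDITION & SPEC =====
-- Pre_ excludes only the empty string, on which A's class_name[0] raises IndexError (B raises there too).
def Pre_predicatedefn_default_predicate_name_py (class_name : String) : Prop := class_name ≠ ""
instance (class_name : String) : Decidable (Pre_predicatedefn_default_predicate_name_py class_name) := by unfold Pre_predicatedefn_default_predicate_name_py; infer_instance
def pvWitness_predicatedefn_default_predicate_name_py : String := "AB_Cd"

def Spec_predicatedefn_default_predicate_name_py (class_name : String) (out : String) : Prop := out = predicatedefn_default_predicate_name_py_alt class_name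
instance (class_name : String) (out : String) : Decidable (Spec_predicatedefn_default_predicate_name_py class_name out) := by unfold Spec_predicatedefn_default_predicate_name_py; infer_instance

-- ===== CLAIM (what is proved, stated in full; the proofs are below) =====
def Claim_equal_predicatedefn_default_predicate_name_py : Prop := ∀ (class_name : String), Dom_predicatedefn_default_predicate_name_py class_name → Pre_predicatedefn_default_predicate_name_py class_name → Spec_predicatedefn_default_predicate_name_py class_name (predicatedefn_default_predicate_name_py class_name)

-- ===== LEMMAS AND PROOFS =====

-- joining with the head segment left untouched (A's copy mode after the cap-run has ended)
def pvTailJoin (cs : List Char) : List Char :=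
  match cs.splitOn '_' with
  | [] => []
  | s :: rest => PySem.Chars.join ['_'] (s :: rest.map pvFixSeg)

def pvG : Bool → List Char → List Char
  | true, cs => PySem.Chars.join ['_'] ((cs.splitOn '_').map pvFixSeg)
  | false, cs => pvTailJoin cs

lemma pvJoin_cons_head (sep : List Char) (c : Char) (s : List Char) (l : List (List Char)) :
    PySem.Chars.join sep ((c :: s) :: l) = c :: PySem.Chars.join sep (s :: l) := by
  cases l with
  | nil => simp [PySem.Chars.join, List.intercalate]
  | cons x xs => simp [PySem.Chars.join, List.intercalate]

lemma pvSplitOn_ne_nil (cs : List Char) : cs.splitOn '_' ≠ [] := by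
  simp only [List.splitOn]
  exact List.splitOnP_ne_nil _ _

lemma pvMain (cs : List Char) : ∀ (out : List Char) (b : Bool),
    (cs.foldl pvStepA (out, b)).1 = out ++ pvG b cs := by
  induction cs with
  | nil =>
    intro out b
    cases b <;>
      simp [pvG, pvTailJoin, List.splitOn, List.splitOnP_nil, pvFixSeg, pvIdxB,
        PySem.Chars.join, List.intercalate]
  | cons c cs ih =>
    intro out b
    by_cases hc : c = '_'
    · subst hc
      have hsplit : ('_' :: cs).splitOn '_' = [] :: cs.splitOn '_' := by
        simp [List.splitOn, List.splitOnP_cons]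
      obtain ⟨s, rest, hsr⟩ : ∃ s rest, cs.splitOn '_' = s :: rest := by
        cases h : cs.splitOn '_' with
        | nil => exact absurd h (pvSplitOn_ne_nil cs)
        | cons s r => exact ⟨s, r, rfl⟩
      have hstep : ∀ b, pvStepA (out, b) '_' = (out ++ ['_'], true) := by
        intro b; simp [pvStepA]
      have hjoin : PySem.Chars.join ['_'] ([] :: pvFixSeg s :: rest.map pvFixSeg)
          = '_' :: PySem.Chars.join ['_'] (pvFixSeg s :: rest.map pvFixSeg) := by
        simp [PySem.Chars.join, List.intercalate]
      cases b <;>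
        simp only [List.foldl_cons, hstep, ih, pvG, pvTailJoin, hsplit, hsr, List.map_cons,
          show pvFixSeg [] = [] from rfl] <;>
        · rw [hjoin]; simp
    · have hsplit : (c :: cs).splitOn '_' = (cs.splitOn '_').modifyHead (c :: ·) := by
        simp [List.splitOn, List.splitOnP_cons, hc]
      obtain ⟨s, rest, hsr⟩ : ∃ s rest, cs.splitOn '_' = s :: rest := by
        cases h : cs.splitOn '_' with
        | nil => exact absurd h (pvSplitOn_ne_nil cs)
        | cons s r => exact ⟨s, r, rfl⟩
      rw [hsr] at hsplit
      simp only [List.modifyHead] at hsplit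
      by_cases halpha : PySem.Chars.isalpha c = true
      · by_cases hupper : PySem.Chars.isupper c = true
        · -- uppercase alphabetic
          cases b with
          | false =>
            have hstep : pvStepA (out, false) c = (out ++ [c], false) := by
              simp [pvStepA, hc, halpha]
            simp only [List.foldl_cons, hstep, ih, pvG, pvTailJoin,
              hsplit, hsr]
            rw [pvJoin_cons_head]; simp
          | true =>
            have hstep : pvStepA (out, true) c = (out ++ [PySem.Chars.lowerChar c], true) := by
              simp [pvStepA, hc, halpha, hupper]
            have hfix : pvFixSeg (c :: s) = PySem.Chars.lowerChar c :: pvFixSeg s := by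
              simp [pvFixSeg, pvIdxB, halpha, hupper]
            simp only [List.foldl_cons, hstep, ih, pvG, hsplit, hsr,
              List.map_cons, hfix]
            rw [pvJoin_cons_head]; simp
        · -- alphabetic, not uppercase: cap-run boundary
          have hupper' : PySem.Chars.isupper c = false := by simpa using hupper
          cases b with
          | false =>
            have hstep : pvStepA (out, false) c = (out ++ [c], false) := by
              simp [pvStepA, hc, halpha]
            simp only [List.foldl_cons, hstep, ih, pvG, pvTailJoin,
              hsplit, hsr]
            rw [pvJoin_cons_head]; simp
          | true =>
            have hstep : pvStepA (out, true) c = (out ++ [c], false) := by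
              simp [pvStepA, hc, halpha, hupper']
            have hfix : pvFixSeg (c :: s) = c :: s := by
              simp [pvFixSeg, pvIdxB, halpha, hupper']
            simp only [List.foldl_cons, hstep, ih, pvG,
              pvTailJoin, hsplit, hsr, List.map_cons, hfix]
            rw [pvJoin_cons_head]; simp
      · -- not alphabetic; also not uppercase (isalpha = isupper || islower)
        have hupper' : PySem.Chars.isupper c = false := by
          cases hu : PySem.Chars.isupper c
          · rfl
          · exact absurd (by simp [PySem.Chars.isalpha, hu]) halpha
        have hstep : pvStepA (out, b) c = (out ++ [c], b) := by
          simp [pvStepA, hc, halpha]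
        have hfix : pvFixSeg (c :: s) = c :: pvFixSeg s := by
          simp [pvFixSeg, pvIdxB, halpha, hupper']
        cases b with
        | false =>
          simp only [List.foldl_cons, hstep, ih, pvG, pvTailJoin,
            hsplit, hsr]
          rw [pvJoin_cons_head]; simp
        | true =>
          simp only [List.foldl_cons, hstep, ih, pvG, hsplit, hsr,
            List.map_cons, hfix]
          rw [pvJoin_cons_head]; simp

-- ===== VERDICT (by name: the statement is the Claim_ definition above) =====
theorem predicatedefn_default_predicate_name_py_spec : Claim_equal_predicatedefn_default_predicate_name_py := by
  intro class_name _hdom _hpre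
  unfold Spec_predicatedefn_default_predicate_name_py
  unfold predicatedefn_default_predicate_name_py predicatedefn_default_predicate_name_py_alt
  cases h : class_name.toList with
  | nil => simp [PySem.List.pyGet?]
  | cons c0 rest =>
    by_cases hl : PySem.Chars.islower c0 = true
    · simp [PySem.List.pyGet?, PySem.List.pyIdx?, hl]
    · have hm := pvMain (c0 :: rest) [] true
      simp only [pvG, List.nil_append] at hm
      rw [show PySem.List.pyGet? (c0 :: rest) 0 = some c0 by simp [PySem.List.pyGet?, PySem.List.pyIdx?]]
      simp only [if_neg hl]
      rw [hm]
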